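-- pv_equiv track=rewrite | github.com/jonatanskogsfors/aoc2025 | src/aoc2025/day_02.py | doubles_in_range
-- ===== SOURCE A (Python) =====
-- def doubles_in_range(given_range: tuple[int, int]) -> set[int]:
--     repeats = set()
--     start, end = given_range
--     for number in range(start, end + 1):
--         string_number = str(number)
--         string_length = len(string_number)
--         if (
--             string_length % 2 == 0
--             and string_number[: string_length // 2] == string_number[string_length // 2 :]
--         ):
--             repeats.add(number)
--     return repeats
-- ===== SOURCE B (Python) =====
-- def doubles_in_range(given_range):
--     # Enumerate "doubled" numbers h*(10**d + 1) per half-length d instead of scanning the range.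
--     start, end = given_range
--     result = set()
--     if end <= 0:
--         return result
--     for d in range(1, len(str(end)) // 2 + 1):
--         base = 10 ** d + 1
--         for h in range(10 ** (d - 1), min(10 ** d - 1, end // base) + 1):
--             n = h * base
--             if n >= start:
--                 result.add(n)
--     return result
-- ===== Notes on version B (the rewrite author's own statement) =====
-- stated objective: faster
-- what changed: Instead of scanning every integer in [start, end] and testing its decimal string for equal halves, B directly enumerates the 'doubled' numbers h*(10^d+1) for each half-length d (h ranging over d-digit numbers up to end//(10^d+1)) and keeps those >= start.
import Mathlib
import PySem

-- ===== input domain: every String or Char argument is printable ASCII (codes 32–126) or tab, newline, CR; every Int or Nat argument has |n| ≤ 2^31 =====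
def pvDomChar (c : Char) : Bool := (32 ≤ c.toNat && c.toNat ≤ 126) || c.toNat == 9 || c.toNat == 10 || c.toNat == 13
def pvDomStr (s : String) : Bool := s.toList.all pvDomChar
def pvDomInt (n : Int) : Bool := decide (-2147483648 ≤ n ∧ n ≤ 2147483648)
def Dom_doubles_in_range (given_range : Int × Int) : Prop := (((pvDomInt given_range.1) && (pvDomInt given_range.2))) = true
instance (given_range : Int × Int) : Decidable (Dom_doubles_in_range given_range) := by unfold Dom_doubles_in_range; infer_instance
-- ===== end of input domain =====

-- B replaces A's scan of the whole range by direct enumeration of the doubled numbers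
-- h*(10^d+1) per half-length d, filtered to the range (objective: faster).

-- ===== PORT A =====
def doubles_in_range (given_range : Int × Int) : List Int :=
  let start := given_range.1
  let «end» := given_range.2
  (PySem.List.pyRange start («end» + 1) 1).foldl
    (fun repeats number =>
      let string_number := PySem.Int.toStr number
      let string_length : Int := PySem.Str.len string_number
      if PySem.Int.mod string_length 2 = 0 ∧
          PySem.Str.slice string_number none (some (PySem.Int.floordiv string_length 2)) =
            PySem.Str.slice string_number (some (PySem.Int.floordiv string_length 2)) none
      then PySem.Set.add repeats number
      else repeats)
    PySem.Set.empty

-- ===== PORT B =====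
-- '10 ** d' is ported as '10 ^ d.toNat': every exponent reached here is ≥ 0, where this is exact.
def doubles_in_range_alt (given_range : Int × Int) : List Int :=
  let start := given_range.1
  let «end» := given_range.2
  if «end» ≤ 0 then PySem.Set.empty
  else
    (PySem.List.pyRange 1 (PySem.Int.floordiv (PySem.Str.len (PySem.Int.toStr «end»)) 2 + 1) 1).foldl
      (fun result d =>
        let base : Int := 10 ^ d.toNat + 1
        (PySem.List.pyRange (10 ^ (d - 1).toNat) (min (10 ^ d.toNat - 1) (PySem.Int.floordiv «end» base) + 1) 1).foldl
          (fun result h =>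
            let n := h * base
            if start ≤ n then PySem.Set.add result n else result)
          result)
      PySem.Set.empty

-- ===== PRECONDITION & SPEC =====
def Spec_doubles_in_range (given_range : Int × Int) (out : List Int) : Prop := out = doubles_in_range_alt given_range
instance (given_range : Int × Int) (out : List Int) : Decidable (Spec_doubles_in_range given_range out) := by unfold Spec_doubles_in_range; infer_instance

-- ===== CLAIM (what is proved, stated in full; the proofs are below) =====
def Claim_equal_doubles_in_range : Prop := ∀ (given_range : Int × Int), Dom_doubles_in_range given_range → Spec_doubles_in_range given_range (doubles_in_range given_range)

-- ===== LEMMAS AND PROOFS =====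

theorem tdc_acc (fuel n : Nat) (ds : List Char) :
    Nat.toDigitsCore 10 fuel n ds = Nat.toDigitsCore 10 fuel n [] ++ ds := by
  induction fuel generalizing n ds with
  | zero => simp [Nat.toDigitsCore]
  | succ fuel ih =>
    simp only [Nat.toDigitsCore]
    by_cases h : n / 10 = 0
    · simp [h]
    · simp only [h, if_false]
      rw [ih (n / 10), ih (n / 10) [Nat.digitChar (n % 10)]]
      simp

theorem tdc_fuel (fuel fuel' n : Nat) (h : n < fuel) (h' : n < fuel') :
    Nat.toDigitsCore 10 fuel n [] = Nat.toDigitsCore 10 fuel' n [] := by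
  induction n using Nat.strong_induction_on generalizing fuel fuel' with
  | _ n ih =>
    match fuel, fuel' with
    | f + 1, f' + 1 =>
      simp only [Nat.toDigitsCore]
      by_cases h0 : n / 10 = 0
      · simp [h0]
      · simp only [h0, if_false]
        rw [tdc_acc f, tdc_acc f']
        have hlt : n / 10 < n := Nat.div_lt_self (Nat.pos_of_ne_zero (by omega)) (by omega)
        rw [ih (n / 10) hlt f f' (by omega) (by omega)]

theorem toDigits_lt10 (n : Nat) (h : n < 10) : Nat.toDigits 10 n = [Nat.digitChar n] := by
  have h0 : n / 10 = 0 := Nat.div_eq_of_lt h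
  have h1 : n % 10 = n := Nat.mod_eq_of_lt h
  simp [Nat.toDigits, Nat.toDigitsCore, h0, h1]

theorem toDigits_step (n : Nat) (h : 10 ≤ n) :
    Nat.toDigits 10 n = Nat.toDigits 10 (n / 10) ++ [Nat.digitChar (n % 10)] := by
  have h0 : n / 10 ≠ 0 := by omega
  show Nat.toDigitsCore 10 (n + 1) n [] = _
  simp only [Nat.toDigitsCore, h0, if_false]
  rw [tdc_acc n, tdc_fuel n (n / 10 + 1) (n / 10) (by omega) (by omega)]
  rfl

theorem toDigits_bounds (n : Nat) (h : 1 ≤ n) :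
    10 ^ ((Nat.toDigits 10 n).length - 1) ≤ n ∧ n < 10 ^ (Nat.toDigits 10 n).length := by
  induction n using Nat.strong_induction_on with
  | _ n ih =>
    by_cases hn : n < 10
    · rw [toDigits_lt10 n hn]; simpa using ⟨h, hn⟩
    · push_neg at hn
      rw [toDigits_step n hn]
      have hlt : n / 10 < n := Nat.div_lt_self (by omega) (by omega)
      obtain ⟨l1, l2⟩ := ih (n / 10) hlt (by omega)
      have hL : 1 ≤ (Nat.toDigits 10 (n / 10)).length := by
        rcases Nat.lt_or_ge (n / 10) 10 with hc | hc
        · rw [toDigits_lt10 _ hc]; simp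
        · rw [toDigits_step _ hc]; simp
      set L := (Nat.toDigits 10 (n / 10)).length with hLdef
      have hBA : 10 ^ L = 10 * 10 ^ (L - 1) := by
        conv_lhs => rw [show L = (L - 1) + 1 by omega]
        rw [pow_succ]; ring
      have hdiv : n = 10 * (n / 10) + n % 10 := by omega
      have hmod : n % 10 < 10 := Nat.mod_lt _ (by omega)
      simp only [List.length_append, List.length_cons, List.length_nil]
      constructor
      · calc 10 ^ (L + 1 - 1) = 10 * 10 ^ (L - 1) := by rw [show L + 1 - 1 = L from rfl, hBA]
          _ ≤ 10 * (n / 10) := by omega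
          _ ≤ n := by omega
      · calc n = 10 * (n / 10) + n % 10 := hdiv
          _ < 10 * 10 ^ L := by omega
          _ = 10 ^ (L + 1) := by rw [pow_succ]; ring

theorem toDigits_len (d n : Nat) (h1 : 10 ^ d ≤ n) (h2 : n < 10 ^ (d + 1)) :
    (Nat.toDigits 10 n).length = d + 1 := by
  have h1' : 1 ≤ n := le_trans (Nat.one_le_pow _ _ (by omega)) h1
  obtain ⟨b1, b2⟩ := toDigits_bounds n h1'
  set L := (Nat.toDigits 10 n).length
  by_contra hne
  rcases Nat.lt_or_ge L (d + 1) with hc | hc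
  · exact absurd (lt_of_le_of_lt h1 b2) (not_lt.2 (Nat.pow_le_pow_right (by omega) (by omega)))
  · have : d + 2 ≤ L := by omega
    exact absurd (lt_of_le_of_lt (le_trans (Nat.pow_le_pow_right (by omega) (show d + 1 ≤ L - 1 by omega)) b1) h2) (by omega)

def padDigits : Nat → Nat → List Char
  | 0, _ => []
  | d + 1, r => padDigits d (r / 10) ++ [Nat.digitChar (r % 10)]

theorem digitChar_inj (a b : Nat) (ha : a < 10) (hb : b < 10) (h : Nat.digitChar a = Nat.digitChar b) : a = b := by
  interval_cases a <;> interval_cases b <;> simp_all [Nat.digitChar]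

theorem padDigits_inj (d r r' : Nat) (hr : r < 10 ^ d) (hr' : r' < 10 ^ d)
    (h : padDigits d r = padDigits d r') : r = r' := by
  induction d generalizing r r' with
  | zero => omega
  | succ d ih =>
    simp only [padDigits] at h
    obtain ⟨h1, h2⟩ := List.append_inj' h (by rfl)
    have e1 : r / 10 = r' / 10 := by
      apply ih <;> first
        | (apply Nat.div_lt_of_lt_mul; rw [← pow_succ']; assumption)
        | exact h1
    have e2 : r % 10 = r' % 10 :=
      digitChar_inj _ _ (Nat.mod_lt _ (by omega)) (Nat.mod_lt _ (by omega)) (by simpa using h2)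
    omega

theorem toDigits_concat (d a r : Nat) (ha : 1 ≤ a) (hr : r < 10 ^ d) :
    Nat.toDigits 10 (a * 10 ^ d + r) = Nat.toDigits 10 a ++ padDigits d r := by
  induction d generalizing r with
  | zero => simp_all [padDigits]
  | succ d ih =>
    have hge : 10 ≤ a * 10 ^ (d + 1) + r := by
      have : 10 ^ (d + 1) ≥ 10 := by
        calc 10 ^ (d+1) = 10 ^ d * 10 := pow_succ 10 d
        _ ≥ 1 * 10 := by have := Nat.one_le_pow d 10 (by omega); omega
        _ = 10 := by omega
      nlinarith
    rw [toDigits_step _ hge]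
    have hpow : 10 ^ (d + 1) = 10 ^ d * 10 := pow_succ 10 d
    obtain ⟨b, hb⟩ : ∃ b, a * 10 ^ d = b := ⟨_, rfl⟩
    have hb' : a * 10 ^ (d + 1) + r = b * 10 + r := by rw [← hb, hpow]; ring
    have hdiv : (a * 10 ^ (d + 1) + r) / 10 = a * 10 ^ d + r / 10 := by
      rw [hb', hb]; omega
    have hmod : (a * 10 ^ (d + 1) + r) % 10 = r % 10 := by
      rw [hb']; omega
    have hr' : r / 10 < 10 ^ d := by omega
    rw [hdiv, hmod, ih _ hr', padDigits]
    simp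

theorem padDigits_eq_toDigits (d h : Nat) (hd : 1 ≤ d) (h1 : 10 ^ (d - 1) ≤ h) (h2 : h < 10 ^ d) :
    padDigits d h = Nat.toDigits 10 h := by
  induction d generalizing h with
  | zero => omega
  | succ d ih =>
    by_cases hd0 : d = 0
    · subst hd0
      simp only [padDigits]
      have : h < 10 := by simpa using h2
      rw [Nat.mod_eq_of_lt this, toDigits_lt10 h this]
      rfl
    · have hge : 10 ≤ h := by
        have : 10 ^ (d + 1 - 1) ≥ 10 := by
          calc 10 ^ d = 10 ^ (d - 1) * 10 := by rw [← pow_succ]; congr 1; omega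
          _ ≥ 1 * 10 := by have := Nat.one_le_pow (d-1) 10 (by omega); omega
          _ = 10 := by omega
        omega
      simp only [padDigits]
      have hb1 : 10 ^ (d - 1) ≤ h / 10 := by
        have : 10 ^ (d + 1 - 1) = 10 ^ (d - 1) * 10 := by rw [← pow_succ]; congr 1; omega
        rw [this] at h1
        omega
      have hb2 : h / 10 < 10 ^ d := by
        rw [pow_succ] at h2; omega
      rw [ih (h / 10) (by omega) hb1 hb2, ← toDigits_step h hge]

theorem toDigits_ne_dash (n : Nat) : ∀ c ∈ Nat.toDigits 10 n, c ≠ '-' := by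
  induction n using Nat.strong_induction_on with
  | _ n ih =>
    by_cases hn : n < 10
    · rw [toDigits_lt10 n hn]
      intro c hc
      interval_cases n <;> simp_all [Nat.digitChar] <;> decide
    · push_neg at hn
      rw [toDigits_step n hn]
      intro c hc
      rcases List.mem_append.1 hc with h | h
      · exact ih (n / 10) (Nat.div_lt_self (by omega) (by omega)) c h
      · have : c = Nat.digitChar (n % 10) := by simpa using h
        subst this
        have : n % 10 < 10 := Nat.mod_lt _ (by omega)
        interval_cases hm : n % 10 <;> simp [Nat.digitChar] <;> decide

theorem toDigits_length_pos (m : Nat) : 1 ≤ (Nat.toDigits 10 m).length := by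
  rcases Nat.lt_or_ge m 10 with h | h
  · rw [toDigits_lt10 m h]; simp
  · rw [toDigits_step m h]; simp

def condA (n : Int) : Prop :=
  PySem.Int.mod (PySem.Str.len (PySem.Int.toStr n)) 2 = 0 ∧
  PySem.Str.slice (PySem.Int.toStr n) none (some (PySem.Int.floordiv (PySem.Str.len (PySem.Int.toStr n)) 2)) =
    PySem.Str.slice (PySem.Int.toStr n) (some (PySem.Int.floordiv (PySem.Str.len (PySem.Int.toStr n)) 2)) none

def condADec : DecidablePred condA := fun n => by unfold condA; infer_instance

def isDouble (n : Int) : Prop :=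
  ∃ d h : Nat, 1 ≤ d ∧ 10 ^ (d - 1) ≤ h ∧ h < 10 ^ d ∧ n = (h : Int) * (10 ^ d + 1)

theorem condA_lists (n : Int) :
    condA n ↔ ((PySem.Int.toChars n).length % 2 = 0 ∧
      (PySem.Int.toChars n).take ((PySem.Int.toChars n).length / 2) =
        (PySem.Int.toChars n).drop ((PySem.Int.toChars n).length / 2)) := by
  unfold condA
  rw [← String.toList_inj, PySem.Str.toList_slice, PySem.Str.toList_slice,
      PySem.Str.len_eq, PySem.Int.toList_toStr]
  rw [show (2:Int) = ((2:Nat):Int) by norm_num, PySem.Int.mod_natCast,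
      PySem.Int.floordiv_natCast]
  simp only [PySem.Chars.slice]
  constructor
  · rintro ⟨h1, h2⟩
    refine ⟨by exact_mod_cast h1, ?_⟩
    rwa [PySem.List.slice_to_natCast, PySem.List.slice_from_natCast] at h2
  · rintro ⟨h1, h2⟩
    refine ⟨by exact_mod_cast h1, ?_⟩
    rwa [PySem.List.slice_to_natCast, PySem.List.slice_from_natCast]


theorem condN_iff (m : Nat) :
    ((Nat.toDigits 10 m).length % 2 = 0 ∧
      (Nat.toDigits 10 m).take ((Nat.toDigits 10 m).length / 2) =
        (Nat.toDigits 10 m).drop ((Nat.toDigits 10 m).length / 2))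
    ↔ ∃ d h : Nat, 1 ≤ d ∧ 10 ^ (d - 1) ≤ h ∧ h < 10 ^ d ∧ m = h * (10 ^ d + 1) := by
  constructor
  · rintro ⟨he, hhalf⟩
    have hL1 : 1 ≤ (Nat.toDigits 10 m).length := toDigits_length_pos m
    set L := (Nat.toDigits 10 m).length with hLdef
    have hm1 : 1 ≤ m := by
      by_contra hm0
      have : m = 0 := by omega
      subst this
      rw [toDigits_lt10 0 (by omega)] at hLdef
      simp at hLdef
      omega
    obtain ⟨b1, b2⟩ := toDigits_bounds m hm1
    set d := L / 2 with hddef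
    have hL2d : L = 2 * d := by omega
    have hd1 : 1 ≤ d := by omega
    have hpowd : (0:Nat) < 10 ^ d := Nat.pow_pos (by omega)
    set h := m / 10 ^ d with hhdef
    set r := m % 10 ^ d with hrdef
    have hmeq : m = h * 10 ^ d + r := by
      rw [hhdef, hrdef, Nat.mul_comm]
      exact (Nat.div_add_mod m (10 ^ d)).symm
    have hr : r < 10 ^ d := Nat.mod_lt _ hpowd
    have hhlt : h < 10 ^ d := by
      rw [hhdef]
      apply Nat.div_lt_of_lt_mul
      calc m < 10 ^ L := b2
        _ = 10 ^ d * 10 ^ d := by rw [← pow_add]; congr 1; omega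
    have hhge : 10 ^ (d - 1) ≤ h := by
      rw [hhdef]
      apply Nat.le_div_iff_mul_le hpowd |>.2
      calc 10 ^ (d - 1) * 10 ^ d = 10 ^ (L - 1) := by rw [← pow_add]; congr 1; omega
        _ ≤ m := b1
    have hh1 : 1 ≤ h := le_trans (Nat.one_le_pow _ _ (by omega)) hhge
    have hs : Nat.toDigits 10 m = Nat.toDigits 10 h ++ padDigits d r := by
      conv_lhs => rw [hmeq]
      exact toDigits_concat d h r hh1 hr
    have hlenh : (Nat.toDigits 10 h).length = d := by
      have := toDigits_len (d - 1) h hhge (by rw [show d - 1 + 1 = d by omega]; exact hhlt)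
      omega
    rw [hs] at hhalf
    rw [List.take_left' (by omega), List.drop_left' (by omega)] at hhalf
    have hpad : padDigits d r = padDigits d h := by
      rw [← hhalf, padDigits_eq_toDigits d h hd1 hhge hhlt]
    have : r = h := padDigits_inj d r h hr hhlt hpad
    exact ⟨d, h, hd1, hhge, hhlt, by rw [hmeq, this]; ring⟩
  · rintro ⟨d, h, hd1, hhge, hhlt, hmeq⟩
    have hh1 : 1 ≤ h := le_trans (Nat.one_le_pow _ _ (by omega)) hhge
    have hs : Nat.toDigits 10 m = Nat.toDigits 10 h ++ Nat.toDigits 10 h := by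
      rw [hmeq, show h * (10 ^ d + 1) = h * 10 ^ d + h by ring,
          toDigits_concat d h h hh1 hhlt, padDigits_eq_toDigits d h hd1 hhge hhlt]
    have hlenh : (Nat.toDigits 10 h).length = d := by
      have := toDigits_len (d - 1) h hhge (by rw [show d - 1 + 1 = d by omega]; exact hhlt)
      omega
    rw [hs]
    have hlen : (Nat.toDigits 10 h ++ Nat.toDigits 10 h).length = 2 * d := by
      simp [hlenh]; ring
    rw [hlen]
    refine ⟨by omega, ?_⟩
    rw [show 2 * d / 2 = d by omega, List.take_left' hlenh, List.drop_left' hlenh]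

theorem toChars_nonneg (n : Int) (h : 0 ≤ n) :
    PySem.Int.toChars n = Nat.toDigits 10 n.toNat := by
  simp [PySem.Int.toChars, not_lt.2 h, show ¬ n < 0 by omega]

theorem toChars_neg (n : Int) (h : n < 0) :
    PySem.Int.toChars n = '-' :: Nat.toDigits 10 n.natAbs := by
  simp [PySem.Int.toChars, h]

theorem condA_iff (n : Int) : condA n ↔ isDouble n := by
  rcases lt_or_ge n 0 with hneg | hpos
  · constructor
    · intro hc
      exfalso
      rw [condA_lists, toChars_neg n hneg] at hc
      obtain ⟨he, hhalf⟩ := hc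
      set ds := Nat.toDigits 10 n.natAbs with hds
      have hds1 : 1 ≤ ds.length := toDigits_length_pos _
      set L := ('-' :: ds).length with hLdef
      have hLlen : L = ds.length + 1 := by simp [hLdef]
      have hL2 : 2 ≤ L := by omega
      set k := L / 2 with hk
      have hk1 : 1 ≤ k := by omega
      have hkL : k < L := by omega
      have h0 : (List.take k ('-' :: ds))[0]? = some '-' := by
        rw [List.getElem?_take, if_pos (show (0:Nat) < k by omega)]
        rfl
      have h1 : (List.drop k ('-' :: ds))[0]? = ('-' :: ds)[k]? := by
        rw [List.getElem?_drop]
        norm_num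
      rw [hhalf] at h0
      rw [h0] at h1
      have hkmem : ('-' :: ds)[k]? = ds[k-1]? := by
        obtain ⟨j, hj⟩ : ∃ j, k = j + 1 := ⟨k - 1, by omega⟩
        rw [hj]
        simp
      rw [hkmem] at h1
      have : '-' ∈ ds := by
        have hklt : k - 1 < ds.length := by omega
        rw [List.getElem?_eq_getElem hklt] at h1
        have hmem := List.getElem_mem hklt
        rw [← Option.some_inj.1 h1] at hmem
        exact hmem
      exact toDigits_ne_dash n.natAbs '-' this rfl
    · rintro ⟨d, h, hd1, hhge, hhlt, hmeq⟩
      exfalso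
      have : (0:Int) ≤ (h : Int) * (10 ^ d + 1) := by positivity
      omega
  · rw [condA_lists, toChars_nonneg n hpos, condN_iff]
    constructor
    · rintro ⟨d, h, hd1, hhge, hhlt, hmeq⟩
      refine ⟨d, h, hd1, hhge, hhlt, ?_⟩
      have : n = (n.toNat : Int) := by omega
      rw [this, hmeq]
      push_cast
      ring
    · rintro ⟨d, h, hd1, hhge, hhlt, hmeq⟩
      refine ⟨d, h, hd1, hhge, hhlt, ?_⟩
      have : (n.toNat : Int) = ((h * (10 ^ d + 1) : Nat) : Int) := by
        push_cast
        rw [Int.toNat_of_nonneg hpos, hmeq]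
      exact_mod_cast this
theorem foldl_set_add_if (p : Int → Prop) [DecidablePred p] (g : Int → Int) (xs : List Int) (acc : List Int)
    (hn : (xs.map g).Nodup) (hd : ∀ x ∈ xs, g x ∉ acc) :
    xs.foldl (fun s h => if p (g h) then PySem.Set.add s (g h) else s) acc
      = acc ++ ((xs.map g).filter (fun n => decide (p n))) := by
  induction xs generalizing acc with
  | nil => simp
  | cons x xs ih =>
    simp only [List.map_cons, List.nodup_cons] at hn
    obtain ⟨hx, hn'⟩ := hn
    simp only [List.foldl_cons, List.map_cons, List.filter_cons]
    by_cases hp : p (g x)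
    · rw [if_pos hp, PySem.Set.add_of_not_mem (hd x (by simp)), if_pos (by simpa using hp)]
      rw [ih (acc ++ [g x]) hn' ?_]
      · simp
      · intro y hy
        simp only [List.mem_append, List.mem_singleton]
        rintro (h | h)
        · exact hd y (by simp [hy]) h
        · exact hx (h ▸ List.mem_map_of_mem hy)
    · rw [if_neg hp, if_neg (by simpa using hp)]
      rw [ih acc hn' (fun y hy => hd y (by simp [hy]))]

def blockB (s e d : Int) : List Int :=
  ((PySem.List.pyRange ((10:Int) ^ (d - 1).toNat)
      (min ((10:Int) ^ d.toNat - 1) (PySem.Int.floordiv e ((10:Int) ^ d.toNat + 1)) + 1)).map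
    (fun h => h * ((10:Int) ^ d.toNat + 1))).filter (fun n => decide (s ≤ n))

theorem mem_blockB (s e d x : Int) :
    x ∈ blockB s e d ↔
      (s ≤ x ∧ ∃ h : Int, (10:Int) ^ (d - 1).toNat ≤ h ∧
        h ≤ min ((10:Int) ^ d.toNat - 1) (PySem.Int.floordiv e ((10:Int) ^ d.toNat + 1)) ∧
        x = h * ((10:Int) ^ d.toNat + 1)) := by
  simp only [blockB, List.mem_filter, List.mem_map, PySem.List.mem_pyRange_one, decide_eq_true_eq]
  constructor
  · rintro ⟨⟨h, ⟨h1, h2⟩, rfl⟩, hs⟩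
    exact ⟨hs, h, h1, by omega, rfl⟩
  · rintro ⟨hs, h, h1, h2, rfl⟩
    exact ⟨⟨h, ⟨h1, by omega⟩, rfl⟩, hs⟩

theorem blockB_pairwise (s e d : Int) : (blockB s e d).Pairwise (· < ·) := by
  apply List.Pairwise.filter
  apply (List.pairwise_map).2
  apply (PySem.List.pairwise_lt_pyRange_one _ _).imp
  intro a b hab
  have hbase : (0:Int) < (10:Int) ^ d.toNat + 1 := by positivity
  exact mul_lt_mul_of_pos_right hab hbase

theorem blockB_bounds (s e d x : Int) (hd : 1 ≤ d) (hx : x ∈ blockB s e d) :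
    (10:Int) ^ (2 * d.toNat - 1) < x ∧ x < (10:Int) ^ (2 * d.toNat) := by
  rw [mem_blockB] at hx
  obtain ⟨hs, h, h1, h2, rfl⟩ := hx
  have hdt : (d - 1).toNat = d.toNat - 1 := by omega
  have hdt1 : 1 ≤ d.toNat := by omega
  constructor
  · calc (10:Int) ^ (2 * d.toNat - 1) = 10 ^ (d.toNat - 1) * 10 ^ d.toNat := by
          rw [← pow_add]; congr 1; omega
      _ < 10 ^ (d.toNat - 1) * (10 ^ d.toNat + 1) := by
          have : (0:Int) < 10 ^ (d.toNat - 1) := by positivity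
          nlinarith
      _ ≤ h * (10 ^ d.toNat + 1) := by
          rw [hdt] at h1
          have : (0:Int) < 10 ^ d.toNat + 1 := by positivity
          nlinarith
  · calc h * (10 ^ d.toNat + 1) ≤ (10 ^ d.toNat - 1) * (10 ^ d.toNat + 1) := by
          have : (0:Int) < 10 ^ d.toNat + 1 := by positivity
          nlinarith [le_min_iff.1 h2]
      _ = 10 ^ d.toNat * 10 ^ d.toNat - 1 := by ring
      _ < 10 ^ (2 * d.toNat) := by rw [two_mul, pow_add]; omega

theorem cand_lb (d h : Int) (hd : 1 ≤ d) (h1 : (10:Int) ^ (d - 1).toNat ≤ h) :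
    (10:Int) ^ (2 * d.toNat - 1) < h * ((10:Int) ^ d.toNat + 1) := by
  have hdt : (d - 1).toNat = d.toNat - 1 := by omega
  have hdt1 : 1 ≤ d.toNat := by omega
  calc (10:Int) ^ (2 * d.toNat - 1) = 10 ^ (d.toNat - 1) * 10 ^ d.toNat := by
        rw [← pow_add]; congr 1; omega
    _ < 10 ^ (d.toNat - 1) * (10 ^ d.toNat + 1) := by
        have : (0:Int) < 10 ^ (d.toNat - 1) := by positivity
        nlinarith
    _ ≤ h * (10 ^ d.toNat + 1) := by
        rw [hdt] at h1
        have : (0:Int) < 10 ^ d.toNat + 1 := by positivity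
        nlinarith

theorem B_fold (s e : Int) (len : Nat) : ∀ (dlo : Int) (acc : List Int),
    1 ≤ dlo → acc.Pairwise (· < ·) →
    (∀ x ∈ acc, x < (10:Int) ^ (2 * dlo.toNat - 1)) →
    (PySem.List.pyRange dlo (dlo + len) 1).foldl
      (fun result d =>
        (PySem.List.pyRange (10 ^ (d - 1).toNat)
            (min ((10:Int) ^ d.toNat - 1) (PySem.Int.floordiv e (10 ^ d.toNat + 1)) + 1) 1).foldl
          (fun result h =>
            if s ≤ h * ((10:Int) ^ d.toNat + 1) then PySem.Set.add result (h * ((10:Int) ^ d.toNat + 1)) else result)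
          result) acc
      = acc ++ (PySem.List.pyRange dlo (dlo + len) 1).flatMap (blockB s e) := by
  induction len with
  | zero =>
    intro dlo acc _ _ _
    rw [show dlo + (0:Nat) = dlo by omega, PySem.List.pyRange_one_eq_nil (by omega)]
    simp
  | succ len ih =>
    intro dlo acc hdlo hpw hbd
    have hcons : PySem.List.pyRange dlo (dlo + (len + 1 : Nat)) 1
        = dlo :: PySem.List.pyRange (dlo + 1) (dlo + (len + 1 : Nat)) 1 :=
      PySem.List.pyRange_one_cons (by push_cast; omega)
    rw [hcons]
    simp only [List.foldl_cons, List.flatMap_cons]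
    have hstep : ((PySem.List.pyRange (10 ^ (dlo - 1).toNat)
        (min ((10:Int) ^ dlo.toNat - 1) (PySem.Int.floordiv e (10 ^ dlo.toNat + 1)) + 1) 1).foldl
          (fun result h =>
            if s ≤ h * ((10:Int) ^ dlo.toNat + 1) then PySem.Set.add result (h * ((10:Int) ^ dlo.toNat + 1)) else result)
          acc) = acc ++ blockB s e dlo := by
      have := foldl_set_add_if (fun n => s ≤ n) (fun h => h * ((10:Int) ^ dlo.toNat + 1))
        (PySem.List.pyRange (10 ^ (dlo - 1).toNat)
          (min ((10:Int) ^ dlo.toNat - 1) (PySem.Int.floordiv e (10 ^ dlo.toNat + 1)) + 1) 1)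
        acc ?_ ?_
      · exact this
      · apply List.Nodup.map
        · intro a b hab
          have hbase : ((10:Int) ^ dlo.toNat + 1) ≠ 0 := by positivity
          exact mul_right_cancel₀ hbase hab
        · exact PySem.List.nodup_pyRange_one _ _
      · intro h hh hmem
        rw [PySem.List.mem_pyRange_one] at hh
        change h * ((10:Int) ^ dlo.toNat + 1) ∈ acc at hmem
        have := cand_lb dlo h hdlo hh.1
        have := hbd _ hmem
        omega
    rw [hstep]
    have hblk_lb : ∀ x ∈ blockB s e dlo, (10:Int) ^ (2 * dlo.toNat - 1) < x :=
      fun x hx => (blockB_bounds s e dlo x hdlo hx).1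
    have hblk_ub : ∀ x ∈ blockB s e dlo, x < (10:Int) ^ (2 * dlo.toNat) :=
      fun x hx => (blockB_bounds s e dlo x hdlo hx).2
    have happ := ih (dlo + 1) (acc ++ blockB s e dlo) (by omega) ?_ ?_
    · rw [show dlo + 1 + (len:Int) = dlo + ((len + 1 : Nat) : Int) by push_cast; ring] at happ
      rw [happ, List.append_assoc]
    · apply List.pairwise_append.2
      refine ⟨hpw, blockB_pairwise s e dlo, ?_⟩
      intro x hx y hy
      have := hbd x hx
      have := hblk_lb y hy
      omega
    · intro x hx
      rcases List.mem_append.1 hx with h | h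
      · have := hbd x h
        have : ((10:Int) ^ (2 * dlo.toNat - 1) : Int) ≤ 10 ^ (2 * (dlo + 1).toNat - 1) :=
          pow_le_pow_right₀ (by omega) (by omega)
        omega
      · have := hblk_ub x h
        have : ((10:Int) ^ (2 * dlo.toNat) : Int) ≤ 10 ^ (2 * (dlo + 1).toNat - 1) :=
          pow_le_pow_right₀ (by omega) (by omega)
        omega

theorem flat_pairwise (s e : Int) (len : Nat) : ∀ (lo : Int), 1 ≤ lo →
    ((PySem.List.pyRange lo (lo + len) 1).flatMap (blockB s e)).Pairwise (· < ·) ∧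
    (∀ x ∈ (PySem.List.pyRange lo (lo + len) 1).flatMap (blockB s e),
      (10:Int) ^ (2 * lo.toNat - 1) < x) := by
  induction len with
  | zero =>
    intro lo _
    rw [show lo + (0:Nat) = lo by omega, PySem.List.pyRange_one_eq_nil (by omega)]
    simp
  | succ len ih =>
    intro lo hlo
    rw [PySem.List.pyRange_one_cons (by push_cast; omega), List.flatMap_cons]
    obtain ⟨ihpw, ihlb⟩ := ih (lo + 1) (by omega)
    rw [show lo + 1 + (len:Int) = lo + ((len + 1 : Nat) : Int) by push_cast; ring] at ihpw ihlb
    have hub : ∀ x ∈ blockB s e lo, x < (10:Int) ^ (2 * lo.toNat) :=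
      fun x hx => (blockB_bounds s e lo x hlo hx).2
    have hlb : ∀ x ∈ blockB s e lo, (10:Int) ^ (2 * lo.toNat - 1) < x :=
      fun x hx => (blockB_bounds s e lo x hlo hx).1
    have hmono : ((10:Int) ^ (2 * lo.toNat) : Int) ≤ 10 ^ (2 * (lo + 1).toNat - 1) :=
      pow_le_pow_right₀ (by omega) (by omega)
    constructor
    · apply List.pairwise_append.2
      refine ⟨blockB_pairwise s e lo, ihpw, ?_⟩
      intro x hx y hy
      have := hub x hx
      have := ihlb y hy
      omega
    · intro x hx
      rcases List.mem_append.1 hx with h | h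
      · exact hlb x h
      · have := ihlb x h
        have : ((10:Int) ^ (2 * lo.toNat - 1) : Int) ≤ 10 ^ (2 * (lo + 1).toNat - 1) :=
          pow_le_pow_right₀ (by omega) (by omega)
        omega

theorem A_eq (s e : Int) :
    doubles_in_range (s, e) = (PySem.List.pyRange s (e + 1) 1).filter (fun n => @decide (condA n) (condADec n)) := by
  have h0 : doubles_in_range (s, e)
      = (PySem.List.pyRange s (e + 1) 1).foldl
          (fun repeats number => @ite _ (condA number) (condADec number) (PySem.Set.add repeats number) repeats)
          [] := rfl
  rw [h0, @PySem.List.foldl_ite_eq_foldl_filter Int (List Int) condA condADec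
        (fun acc x => PySem.Set.add acc x) (PySem.List.pyRange s (e + 1) 1) [],
      ← PySem.Set.ofList_eq_foldl]
  exact PySem.Set.ofList_eq_self_of_nodup _ (List.Nodup.filter _ (PySem.List.nodup_pyRange_one s (e + 1)))

theorem isDouble_pos (n : Int) (h : isDouble n) : 0 < n := by
  obtain ⟨d, hh, hd1, hge, hlt, rfl⟩ := h
  have h1 : 1 ≤ hh := le_trans (Nat.one_le_pow _ _ (by omega)) hge
  have : (1:Int) ≤ (hh:Int) := by exact_mod_cast h1
  nlinarith [pow_pos (show (0:Int) < 10 by omega) d]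

theorem B_empty (s e : Int) (he : e ≤ 0) : doubles_in_range_alt (s, e) = [] := by
  simp only [doubles_in_range_alt]
  rw [if_pos he]
  rfl

theorem cand_lb_nat (d h : Nat) (hd : 1 ≤ d) (h1 : 10 ^ (d - 1) ≤ h) :
    10 ^ (2 * d - 1) < h * (10 ^ d + 1) := by
  have e1 : (10:Nat) ^ (2 * d - 1) = 10 ^ (d - 1) * 10 ^ d := by rw [← pow_add]; congr 1; omega
  have hp : 0 < (10:Nat) ^ (d - 1) := Nat.pow_pos (by omega)
  have hq : 0 < (10:Nat) ^ d := Nat.pow_pos (by omega)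
  nlinarith

theorem mem_iff_key (s e a : Int) (he : 0 < e) :
    (s ≤ a ∧ a < e + 1 ∧ condA a) ↔
      (∃ d : Int, (1 ≤ d ∧ d < PySem.Int.floordiv (PySem.Str.len (PySem.Int.toStr e)) 2 + 1) ∧
        a ∈ blockB s e d) := by
  have hMval : PySem.Int.floordiv (PySem.Str.len (PySem.Int.toStr e)) 2
      = (((Nat.toDigits 10 e.toNat).length / 2 : Nat) : Int) := by
    rw [PySem.Str.len_eq, PySem.Int.toList_toStr, toChars_nonneg e (by omega),
        show (2:Int) = ((2:Nat):Int) by norm_num, PySem.Int.floordiv_natCast]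
  obtain ⟨eb1, eb2⟩ := toDigits_bounds e.toNat (by omega)
  set Le := (Nat.toDigits 10 e.toNat).length with hLe
  constructor
  · rintro ⟨hs, hae, hc⟩
    obtain ⟨d, h, hd1, hge, hlt, haeq⟩ := (condA_iff a).1 hc
    have hbasepos : (0:Int) < (10:Int) ^ d + 1 := by positivity
    have hlba : ((10 ^ (2 * d - 1) : Nat) : Int) < a := by
      rw [haeq]
      exact_mod_cast cand_lb_nat d h hd1 hge
    refine ⟨(d:Int), ⟨by exact_mod_cast hd1, ?_⟩, ?_⟩
    · rw [hMval]
      have hnat : (10:Nat) ^ (2 * d - 1) < e.toNat := by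
        have hint : ((10 ^ (2 * d - 1) : Nat) : Int) < e := by omega
        exact Int.lt_toNat.mpr hint
      have h2d : 2 * d ≤ Le := by
        by_contra hcon
        have : 10 ^ Le ≤ (10:Nat) ^ (2 * d - 1) := Nat.pow_le_pow_right (by omega) (by omega)
        omega
      have : d ≤ Le / 2 := by omega
      exact_mod_cast (by omega : (d:Int) < ((Le / 2 : Nat) : Int) + 1)
    · rw [mem_blockB]
      refine ⟨hs, (h:Int), ?_, ?_, ?_⟩
      · rw [show ((d:Int) - 1).toNat = d - 1 by omega]
        exact_mod_cast hge
      · rw [Int.toNat_natCast]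
        apply le_min
        · have : (h:Int) < (10:Int) ^ d := by exact_mod_cast hlt
          omega
        · refine (PySem.Int.le_floordiv_iff_mul_le hbasepos).2 ?_
          rw [← haeq]
          omega
      · rw [Int.toNat_natCast]
        exact haeq
  · rintro ⟨d, ⟨hd1, hdM⟩, hmem⟩
    rw [mem_blockB] at hmem
    obtain ⟨hs, h, h1, h2, rfl⟩ := hmem
    have hbasepos : (0:Int) < (10:Int) ^ d.toNat + 1 := by positivity
    have hh0 : (0:Int) < h := lt_of_lt_of_le (by positivity) h1
    refine ⟨hs, ?_, ?_⟩
    · have := (PySem.Int.le_floordiv_iff_mul_le hbasepos).1 (le_trans h2 (min_le_right _ _))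
      omega
    · rw [condA_iff]
      refine ⟨d.toNat, h.toNat, by omega, ?_, ?_, ?_⟩
      · have hd1n : (d - 1).toNat = d.toNat - 1 := by omega
        rw [hd1n] at h1
        have hcast : ((10 ^ (d.toNat - 1) : Nat) : Int) ≤ h := by push_cast; exact h1
        omega
      · have hle : h ≤ (10:Int) ^ d.toNat - 1 := le_trans h2 (min_le_left _ _)
        have : h < ((10 ^ d.toNat : Nat) : Int) := by push_cast; omega
        omega
      · rw [show ((h.toNat : Nat) : Int) = h by omega]

theorem M_nonneg (e : Int) (he : 0 < e) :
    0 ≤ PySem.Int.floordiv (PySem.Str.len (PySem.Int.toStr e)) 2 := by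
  rw [PySem.Str.len_eq, PySem.Int.toList_toStr, toChars_nonneg e (by omega),
      show (2:Int) = ((2:Nat):Int) by norm_num, PySem.Int.floordiv_natCast]
  positivity

theorem B_eq (s e : Int) (he : 0 < e) :
    doubles_in_range_alt (s, e)
      = (PySem.List.pyRange 1 (PySem.Int.floordiv (PySem.Str.len (PySem.Int.toStr e)) 2 + 1) 1).flatMap
          (blockB s e) := by
  have hM0 := M_nonneg e he
  set M := PySem.Int.floordiv (PySem.Str.len (PySem.Int.toStr e)) 2 with hM
  have h0 : doubles_in_range_alt (s, e)
      = (PySem.List.pyRange 1 (M + 1) 1).foldl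
          (fun result d =>
            (PySem.List.pyRange (10 ^ (d - 1).toNat)
                (min ((10:Int) ^ d.toNat - 1) (PySem.Int.floordiv e ((10:Int) ^ d.toNat + 1)) + 1) 1).foldl
              (fun result h =>
                if s ≤ h * ((10:Int) ^ d.toNat + 1) then PySem.Set.add result (h * ((10:Int) ^ d.toNat + 1))
                else result)
              result) [] := by
    simp only [doubles_in_range_alt]
    rw [if_neg (show ¬ e ≤ 0 by omega)]
    rfl
  rw [h0]
  have hb := B_fold s e M.toNat 1 [] (le_refl 1) List.Pairwise.nil (by simp)
  rw [show (1:Int) + ((M.toNat : Nat) : Int) = M + 1 by omega] at hb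
  rw [hb]
  simp

theorem AB (gr : Int × Int) : doubles_in_range gr = doubles_in_range_alt gr := by
  obtain ⟨s, e⟩ := gr
  by_cases he : e ≤ 0
  · rw [A_eq, B_empty s e he]
    apply List.filter_eq_nil_iff.mpr
    intro n hn
    rw [PySem.List.mem_pyRange_one] at hn
    simp only [decide_eq_true_eq]
    intro hc
    have := isDouble_pos n ((condA_iff n).1 hc)
    omega
  · replace he : 0 < e := by omega
    rw [A_eq, B_eq s e he]
    have hM0 := M_nonneg e he
    set M := PySem.Int.floordiv (PySem.Str.len (PySem.Int.toStr e)) 2 with hM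
    have hMrw : M + 1 = 1 + ((M.toNat : Nat) : Int) := by omega
    have hflat := flat_pairwise s e M.toNat 1 (le_refl 1)
    rw [← hMrw] at hflat
    obtain ⟨hBpw, _⟩ := hflat
    have hApw : ((PySem.List.pyRange s (e + 1) 1).filter (fun n => @decide (condA n) (condADec n))).Pairwise (· < ·) :=
      List.Pairwise.filter _ (PySem.List.pairwise_lt_pyRange_one s (e + 1))
    apply PySem.List.eq_of_perm_of_pairwise_le_of_injective (fun x : Int => x) (fun a b h => h)
    · apply (List.perm_ext_iff_of_nodup ?_ ?_).2
      · intro x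
        rw [List.mem_filter, List.mem_flatMap]
        constructor
        · rintro ⟨hx, hcx⟩
          rw [PySem.List.mem_pyRange_one] at hx
          obtain ⟨d, hd, hbd⟩ := (mem_iff_key s e x he).1 ⟨hx.1, hx.2, @of_decide_eq_true (condA x) (condADec x) hcx⟩
          exact ⟨d, PySem.List.mem_pyRange_one.2 ⟨hd.1, hd.2⟩, hbd⟩
        · rintro ⟨d, hd, hbd⟩
          rw [PySem.List.mem_pyRange_one] at hd
          obtain ⟨h1, h2, h3⟩ := (mem_iff_key s e x he).2 ⟨d, ⟨hd.1, hd.2⟩, hbd⟩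
          exact ⟨PySem.List.mem_pyRange_one.2 ⟨h1, h2⟩, @decide_eq_true (condA x) (condADec x) h3⟩
      · exact List.Nodup.filter _ (PySem.List.nodup_pyRange_one s (e + 1))
      · exact hBpw.imp (fun h => ne_of_lt h)
    · exact hApw.imp (fun h => le_of_lt h)
    · exact hBpw.imp (fun h => le_of_lt h)

-- ===== VERDICT (by name: the statement is the Claim_ definition above) =====
theorem doubles_in_range_spec : Claim_equal_doubles_in_range := by
  intro gr _
  unfold Spec_doubles_in_range
  exact AB gr
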